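-- pv_equiv track=rewrite | github.com/pixeltable/pixeltable-doctools | pixeltable_doctools/mintlifier/page_base.py | _escape_braces_outside_code
-- ===== SOURCE A (Python) =====
-- def _escape_braces_outside_code(text: str) -> str:
--     """Escape curly braces in text, but preserve them inside code blocks and inline code.
--
--     Args:
--         text: Markdown text that may contain code blocks
--
--     Returns:
--         Text with braces escaped except inside code
--     """
--     if not text:
--         return text
--
--     # Split by code blocks (```...```) and inline code (`...`)
--     # We'll process text outside these blocks
--     parts = []
--     in_code_block = False
--     in_inline_code = False
--     i = 0
--
--     while i < len(text):
--         # Check for code block delimiter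
--         if i + 2 < len(text) and text[i : i + 3] == "```":
--             in_code_block = not in_code_block
--             parts.append(text[i : i + 3])
--             i += 3
--         # Check for inline code delimiter (but not if we're in a code block)
--         elif not in_code_block and text[i] == "`":
--             in_inline_code = not in_inline_code
--             parts.append(text[i])
--             i += 1
--         # Regular character - escape braces if not in code
--         else:
--             if not in_code_block and not in_inline_code:
--                 if text[i] == "{":
--                     parts.append("\\{")
--                     i += 1
--                 elif text[i] == "}":
--                     parts.append("\\}")
--                     i += 1
--                 else:
--                     parts.append(text[i])
--                     i += 1
--             else:
--                 parts.append(text[i])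
--                 i += 1
--
--     return "".join(parts)
-- ===== SOURCE B (Python) =====
-- def _escape_braces_outside_code(text: str) -> str:
--     # Staged algorithm: split the whole text on "```" (chunks alternate
--     # outside/inside fenced code), split each outside chunk on "`" (pieces
--     # alternate by index between plain text and inline code, with the inline
--     # parity threaded across fenced blocks), escape braces only in the plain
--     # pieces, and rejoin with the original delimiters.
--     chunks = text.split("```")
--     out = []
--     inline = False
--     outside = True
--     for chunk in chunks:
--         if outside:
--             pieces = chunk.split("`")
--             out.append("`".join(
--                 p if (j % 2 == 1) != inline
--                 else p.replace("{", "\\{").replace("}", "\\}")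
--                 for j, p in enumerate(pieces)))
--             inline ^= (len(pieces) - 1) % 2 == 1
--         else:
--             out.append(chunk)
--         outside = not outside
--     return "```".join(out)
-- ===== Notes on version B (the rewrite author's own statement) =====
-- stated objective: faster
-- what changed: A walks the string once character by character with an inline state machine; B instead splits the whole text on the triple-backtick fence delimiter (chunks alternate outside/inside fenced code), splits each outside chunk on the single-backtick delimiter (pieces alternate by index between plain and inline code, with inline parity threaded across fences), escapes braces via str.replace only on the plain pieces, and rejoins with the original delimiters (bulk C-level split/replace/join instead of per-character Python work).
import Mathlib
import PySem

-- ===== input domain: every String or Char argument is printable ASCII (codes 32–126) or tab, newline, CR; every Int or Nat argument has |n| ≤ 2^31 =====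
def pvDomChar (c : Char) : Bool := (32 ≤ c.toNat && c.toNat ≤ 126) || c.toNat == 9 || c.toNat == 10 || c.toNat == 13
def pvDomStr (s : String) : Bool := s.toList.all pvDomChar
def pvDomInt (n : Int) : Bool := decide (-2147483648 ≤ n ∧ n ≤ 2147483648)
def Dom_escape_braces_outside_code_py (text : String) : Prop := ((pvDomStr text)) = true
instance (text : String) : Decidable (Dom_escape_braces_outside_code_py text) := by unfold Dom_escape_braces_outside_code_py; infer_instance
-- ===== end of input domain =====

-- B replaces A's per-character state machine by a staged split-and-rejoin
-- decomposition: split on the fence delimiter, split outside chunks on the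
-- inline-code delimiter, escape braces only in the plain pieces (alternating
-- by index, inline parity threaded across fenced blocks), rejoin
-- (measured faster in a timing run: bulk split/replace/join).

-- ===== PORT A =====
-- A: one pass over the characters; each regular character is escaped (or not) on the spot.
def goA_escape (ib ii : Bool) (cs : List Char) : List Char :=
  match cs with
  | [] => []
  | '`' :: '`' :: '`' :: rest => '`' :: '`' :: '`' :: goA_escape (!ib) ii rest
  | c :: rest =>
      if !ib && c == '`' then c :: goA_escape ib (!ii) rest
      else if !ib && !ii then
        if c == '{' then '\\' :: '{' :: goA_escape ib ii rest
        else if c == '}' then '\\' :: '}' :: goA_escape ib ii rest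
        else c :: goA_escape ib ii rest
      else c :: goA_escape ib ii rest

def escape_braces_outside_code_py (text : String) : String :=
  if text.toList = [] then text
  else String.ofList (goA_escape false false text.toList)

-- ===== PORT B =====
-- p.replace("{", "\\{").replace("}", "\\}")
def escPieceB (p : List Char) : List Char :=
  PySem.Chars.replace (PySem.Chars.replace p ['{'] ['\\', '{']) ['}'] ['\\', '}']

-- the body of Source B's for-loop; state = (out, inline, outside)
def bStep (st : List (List Char) × Bool × Bool) (chunk : List Char) :
    List (List Char) × Bool × Bool :=
  let (out, inline, outside) := st
  if outside then
    let pieces := PySem.Chars.splitOn chunk ['`']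
    (out ++ [PySem.Chars.join ['`'] ((PySem.List.enumerate pieces 0).map
        (fun jp => if (PySem.Int.mod jp.1 2 == 1) != inline then jp.2 else escPieceB jp.2))],
     inline ^^ ((pieces.length - 1) % 2 == 1), !outside)
  else (out ++ [chunk], inline, !outside)

def escape_braces_outside_code_py_alt (text : String) : String :=
  String.ofList (PySem.Chars.join ['`', '`', '`']
    (((PySem.Chars.splitOn text.toList ['`', '`', '`']).foldl bStep ([], false, true)).1))

-- ===== PRECONDITION & SPEC =====
def Spec_escape_braces_outside_code_py (text : String) (out : String) : Prop := out = escape_braces_outside_code_py_alt text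
instance (text : String) (out : String) : Decidable (Spec_escape_braces_outside_code_py text out) := by unfold Spec_escape_braces_outside_code_py; infer_instance

-- ===== CLAIM (what is proved, stated in full; the proofs are below) =====
def Claim_equal_escape_braces_outside_code_py : Prop := ∀ (text : String), Dom_escape_braces_outside_code_py text → Spec_escape_braces_outside_code_py text (escape_braces_outside_code_py text)

-- ===== LEMMAS AND PROOFS =====

-- structural versions of splitOn on the two concrete separators
def sp1 : List Char → List (List Char)
  | [] => [[]]
  | '`' :: r => [] :: sp1 r
  | c :: r => (sp1 r).modifyHead (c :: ·)

def sp3 : List Char → List (List Char)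
  | '`' :: '`' :: '`' :: r => [] :: sp3 r
  | c :: r => (sp3 r).modifyHead (c :: ·)
  | [] => [[]]

theorem modifyHead_modifyHead' {α : Type} (l : List α) (f g : α → α) :
    (l.modifyHead f).modifyHead g = l.modifyHead (g ∘ f) := by
  cases l <;> simp

theorem go1_eq : ∀ (fuel : Nat) (l cur : List Char) (acc : List (List Char)),
    l.length ≤ fuel →
    PySem.Chars.splitOn.go ['`'] fuel l cur acc
      = acc.reverse ++ (sp1 l).modifyHead (cur.reverse ++ ·) := by
  intro fuel
  induction fuel with
  | zero =>
    intro l cur acc h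
    have : l = [] := by cases l <;> simp_all
    subst this
    simp [PySem.Chars.splitOn.go, sp1]
  | succ f ih =>
    intro l cur acc h
    cases l with
    | nil => simp [PySem.Chars.splitOn.go, sp1]
    | cons c r =>
      simp only [List.length_cons] at h
      by_cases hc : c = '`'
      · subst hc
        rw [show PySem.Chars.splitOn.go ['`'] (f+1) ('`' :: r) cur acc
              = PySem.Chars.splitOn.go ['`'] f r [] (cur.reverse :: acc) by
            simp [PySem.Chars.splitOn.go, List.isPrefixOf]]
        rw [ih r [] _ (by omega)]
        rw [show sp1 ('`' :: r) = [] :: sp1 r from rfl]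
        cases hs : sp1 r <;> simp
      · rw [show PySem.Chars.splitOn.go ['`'] (f+1) (c :: r) cur acc
              = PySem.Chars.splitOn.go ['`'] f r (c :: cur) acc by
            simp only [PySem.Chars.splitOn.go]
            rw [if_neg (by simp [List.isPrefixOf]; exact fun e => hc e.symm)]]
        rw [ih r (c :: cur) _ (by omega)]
        rw [sp1.eq_3 _ _ (by simp [hc]), modifyHead_modifyHead']
        cases hs : sp1 r <;> simp [Function.comp]

theorem splitOn_eq_sp1 (l : List Char) : PySem.Chars.splitOn l ['`'] = sp1 l := by
  unfold PySem.Chars.splitOn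
  rw [go1_eq (l.length + 1) l [] [] (by omega)]
  cases h : sp1 l <;> simp

theorem go3_eq : ∀ (fuel : Nat) (l cur : List Char) (acc : List (List Char)),
    l.length ≤ fuel →
    PySem.Chars.splitOn.go ['`', '`', '`'] fuel l cur acc
      = acc.reverse ++ (sp3 l).modifyHead (cur.reverse ++ ·) := by
  intro fuel
  induction fuel with
  | zero =>
    intro l cur acc h
    have : l = [] := by cases l <;> simp_all
    subst this
    simp [PySem.Chars.splitOn.go, sp3]
  | succ f ih =>
    intro l cur acc h
    cases l with
    | nil => simp [PySem.Chars.splitOn.go, sp3]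
    | cons c r =>
      simp only [List.length_cons] at h
      by_cases hp : (['`', '`', '`'] : List Char).isPrefixOf (c :: r)
      · obtain ⟨t, ht⟩ := (List.isPrefixOf_iff_prefix.mp hp)
        simp only [List.cons_append, List.nil_append] at ht
        cases ht
        rw [show PySem.Chars.splitOn.go ['`','`','`'] (f+1) ('`'::'`'::'`'::t) cur acc
              = PySem.Chars.splitOn.go ['`','`','`'] f t [] (cur.reverse :: acc) by
            simp [PySem.Chars.splitOn.go, List.isPrefixOf]]
        rw [ih t [] _ (by simp at h ⊢; omega)]
        rw [show sp3 ('`'::'`'::'`'::t) = [] :: sp3 t from rfl]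
        cases hs : sp3 t <;> simp
      · rw [show PySem.Chars.splitOn.go ['`','`','`'] (f+1) (c :: r) cur acc
              = PySem.Chars.splitOn.go ['`','`','`'] f r (c :: cur) acc by
            simp only [PySem.Chars.splitOn.go]; rw [if_neg (by simpa using hp)]]
        rw [ih r (c :: cur) _ (by omega)]
        rw [sp3.eq_2 _ _ (by
            intro r1 hc hr
            exact hp (by rw [hc, hr]; simp [List.isPrefixOf])), modifyHead_modifyHead']
        cases hs : sp3 r <;> simp [Function.comp]

theorem splitOn_eq_sp3 (l : List Char) : PySem.Chars.splitOn l ['`', '`', '`'] = sp3 l := by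
  unfold PySem.Chars.splitOn
  rw [go3_eq (l.length + 1) l [] [] (by omega)]
  cases h : sp3 l <;> simp

theorem sp1_ne_nil (l : List Char) : sp1 l ≠ [] := by
  fun_induction sp1 l <;> simp_all
theorem sp3_ne_nil (l : List Char) : sp3 l ≠ [] := by
  fun_induction sp3 l <;> simp_all

-- escaping one plain piece: replace-chain = flatMap of a per-char escape
def escCharL (c : Char) : List Char :=
  if c == '{' then ['\\', '{'] else if c == '}' then ['\\', '}'] else [c]

theorem replace_go_single (o : Char) (new : List Char) :
    ∀ (l : List Char) (fuel : Nat) (acc : List Char), l.length ≤ fuel →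
      PySem.Chars.replace.go [o] new fuel l acc
        = acc.reverse ++ l.flatMap (fun c => if c == o then new else [c]) := by
  intro l
  induction l with
  | nil => intro fuel acc _; cases fuel <;> simp [PySem.Chars.replace.go]
  | cons c t ih =>
    intro fuel acc hf
    simp only [List.length_cons] at hf
    cases fuel with
    | zero => omega
    | succ f =>
      simp only [PySem.Chars.replace.go, List.isPrefixOf, Bool.and_true]
      by_cases h : o == c
      · rw [if_pos h, List.length_singleton, List.drop_one, List.tail_cons,
          ih _ _ (by omega)]
        have : c = o := ((beq_iff_eq).mp h).symm
        simp [this]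
      · rw [if_neg (by simpa using h), ih _ _ (by omega)]
        have : ¬ c = o := fun e => h (by simp [e])
        simp [this]

theorem replace_single (cs : List Char) (o : Char) (new : List Char) :
    PySem.Chars.replace cs [o] new = cs.flatMap (fun c => if c == o then new else [c]) := by
  simp only [PySem.Chars.replace, List.isEmpty_cons, Bool.false_eq_true, if_false]
  simpa using replace_go_single o new cs cs.length [] le_rfl

theorem escPieceB_eq (p : List Char) : escPieceB p = p.flatMap escCharL := by
  have key : ∀ c : Char,
      ((if c == '{' then ['\\', '{'] else [c]).flatMap
        (fun c => if c == '}' then ['\\', '}'] else [c])) = escCharL c := by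
    intro c
    by_cases h1 : c = '{' <;> by_cases h2 : c = '}' <;> simp_all [escCharL]
  simp only [escPieceB, replace_single]
  rw [List.flatMap_assoc]
  simp only [key]

-- pieces of an outside chunk, processed with a verbatim?/escape flag that
-- flips at each piece
def procP (v : Bool) : List (List Char) → List (List Char)
  | [] => []
  | p :: r => (if v then p else p.flatMap escCharL) :: procP (!v) r

theorem procP_ne_nil (v : Bool) (ps : List (List Char)) (h : ps ≠ []) :
    procP v ps ≠ [] := by
  cases ps <;> simp_all [procP]

def escOut (ii : Bool) (chunk : List Char) : List Char :=
  PySem.Chars.join ['`'] (procP ii (sp1 chunk))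

def pbt (l : List Char) : Bool := ((sp1 l).length - 1) % 2 == 1

-- chunks processed alternately, threading the inline state
def proc : Bool → Bool → List (List Char) → List (List Char)
  | ii, true, ch :: r => escOut ii ch :: proc (ii ^^ pbt ch) false r
  | ii, false, ch :: r => ch :: proc ii true r
  | _, _, [] => []

theorem proc_ne_nil (ii o : Bool) (chs : List (List Char)) (h : chs ≠ []) :
    proc ii o chs ≠ [] := by
  cases chs <;> cases o <;> simp_all [proc]

theorem enumMap_eq_procP (ii : Bool) :
    ∀ (ps : List (List Char)) (k : Nat),
    (PySem.List.enumerate ps (k : Int)).map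
        (fun jp => if (PySem.Int.mod jp.1 2 == 1) != ii then jp.2 else escPieceB jp.2)
      = procP ((PySem.Int.mod (k : Int) 2 == 1) != ii) ps := by
  intro ps
  induction ps with
  | nil => intro k; simp [PySem.List.enumerate_nil, procP]
  | cons p r ih =>
    intro k
    rw [PySem.List.enumerate_cons, List.map_cons]
    have hcast : ((k : Int) + 1) = ((k + 1 : Nat) : Int) := by push_cast; ring
    rw [hcast, ih (k + 1)]
    have hm : ∀ m : Nat, PySem.Int.mod (m : Int) 2 = ((m % 2 : Nat) : Int) := by
      intro m
      rw [PySem.Int.mod_eq_emod_of_pos (by norm_num)]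
      push_cast
      omega
    have hflip : (PySem.Int.mod ((k + 1 : Nat) : Int) 2 == 1)
        = !(PySem.Int.mod (k : Int) 2 == 1) := by
      rw [hm, hm]
      rcases Nat.mod_two_eq_zero_or_one k with h | h <;>
        simp [Nat.add_mod, h]
    rw [hflip]
    simp only [procP, escPieceB_eq]
    cases hb : (PySem.Int.mod (k : Int) 2 == 1) <;> cases ii <;> simp

theorem fold_out : ∀ (chunks : List (List Char)) (out : List (List Char)) (ii outside : Bool),
    (chunks.foldl bStep (out, ii, outside)).1 = out ++ proc ii outside chunks := by
  intro chunks
  induction chunks with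
  | nil => intro out ii outside; simp [proc]
  | cons ch r ih =>
    intro out ii outside
    rw [List.foldl_cons]
    cases outside with
    | true =>
      show (r.foldl bStep (bStep (out, ii, true) ch)).1 = _
      rw [show bStep (out, ii, true) ch
            = (out ++ [escOut ii ch], ii ^^ pbt ch, false) by
          simp only [bStep, splitOn_eq_sp1]
          rw [show ((0 : Int)) = ((0 : Nat) : Int) by norm_num, enumMap_eq_procP]
          simp [escOut, pbt]]
      rw [ih]
      simp [proc]
    | false =>
      show (r.foldl bStep (bStep (out, ii, false) ch)).1 = _
      rw [show bStep (out, ii, false) ch = (out ++ [ch], ii, true) by simp [bStep]]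
      rw [ih]
      simp [proc]

-- join facts specialised to what we need
theorem join_head_append (s x h : List Char) (t : List (List Char)) :
    PySem.Chars.join s ((x ++ h) :: t) = x ++ PySem.Chars.join s (h :: t) := by
  cases t with
  | nil => rw [PySem.Chars.join_singleton, PySem.Chars.join_singleton]
  | cons y r =>
    rw [PySem.Chars.join_cons_cons, PySem.Chars.join_cons_cons]
    simp [List.append_assoc]

-- step lemmas for escOut / pbt
theorem escOut_nil (ii : Bool) : escOut ii [] = [] := by
  cases ii <;> rfl

theorem escOut_tick (ii : Bool) (o : List Char) :
    escOut ii ('`' :: o) = '`' :: escOut (!ii) o := by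
  unfold escOut
  rw [show sp1 ('`' :: o) = [] :: sp1 o from rfl]
  rcases hq : procP (!ii) (sp1 o) with _ | ⟨q, t⟩
  · exact absurd hq (procP_ne_nil _ _ (sp1_ne_nil o))
  · rw [show procP ii ([] :: sp1 o) = [] :: procP (!ii) (sp1 o) by
        cases ii <;> simp [procP], hq, PySem.Chars.join_cons_cons]
    simp

theorem escOut_char (ii : Bool) (c : Char) (o : List Char) (hc : c ≠ '`') :
    escOut ii (c :: o) = (if ii then [c] else escCharL c) ++ escOut ii o := by
  unfold escOut
  rw [sp1.eq_3 _ _ (by simp [hc])]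
  rcases hp : sp1 o with _ | ⟨p, t⟩
  · exact absurd hp (sp1_ne_nil o)
  · rw [List.modifyHead_cons]
    rw [show procP ii ((c :: p) :: t)
          = ((if ii then [c] else escCharL c) ++ (if ii then p else p.flatMap escCharL))
              :: procP (!ii) t by cases ii <;> simp [procP]]
    rw [show procP ii (p :: t)
          = (if ii then p else p.flatMap escCharL) :: procP (!ii) t by
        cases ii <;> simp [procP]]
    exact join_head_append _ _ _ _

theorem pbt_nil : pbt [] = false := rfl

theorem pbt_tick (o : List Char) : pbt ('`' :: o) = !pbt o := by
  unfold pbt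
  rw [show sp1 ('`' :: o) = [] :: sp1 o from rfl]
  rcases hp : sp1 o with _ | ⟨p, t⟩
  · exact absurd hp (sp1_ne_nil o)
  · simp only [List.length_cons, Nat.add_sub_cancel]
    rcases Nat.mod_two_eq_zero_or_one t.length with h | h <;>
      simp [Nat.add_mod, h]

theorem pbt_char (c : Char) (o : List Char) (hc : c ≠ '`') : pbt (c :: o) = pbt o := by
  unfold pbt
  rw [sp1.eq_3 _ _ (by simp [hc])]
  rcases hp : sp1 o with _ | ⟨p, t⟩
  · exact absurd hp (sp1_ne_nil o)
  · simp

-- the main correspondence: A's scan = join of B's processed chunks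
theorem xorNotRight (a b : Bool) : (a ^^ (!b)) = ((!a) ^^ b) := by
  cases a <;> cases b <;> rfl

theorem mainA : ∀ (l : List Char) (ii : Bool),
    goA_escape false ii l = PySem.Chars.join ['`', '`', '`'] (proc ii true (sp3 l))
    ∧ goA_escape true ii l = PySem.Chars.join ['`', '`', '`'] (proc ii false (sp3 l)) := by
  intro l
  fun_induction sp3 l with
  | case1 r ih =>
    intro ii
    obtain ⟨ih1, ih2⟩ := ih ii
    rcases hs : sp3 r with _ | ⟨ch, t⟩
    · exact absurd hs (sp3_ne_nil r)
    constructor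
    · rw [show goA_escape false ii ('`'::'`'::'`'::r)
            = '`'::'`'::'`':: goA_escape true ii r from rfl, ih2, hs]
      rw [show proc ii true ([] :: ch :: t)
            = escOut ii [] :: proc (ii ^^ pbt []) false (ch :: t) from rfl]
      rw [escOut_nil, pbt_nil, Bool.xor_false]
      rcases hq : proc ii false (ch :: t) with _ | ⟨q, qs⟩
      · exact absurd hq (proc_ne_nil ii false (ch :: t) (by simp))
      · rw [PySem.Chars.join_cons_cons]
        simp
    · rw [show goA_escape true ii ('`'::'`'::'`'::r)
            = '`'::'`'::'`':: goA_escape false ii r from rfl, ih1, hs]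
      rw [show proc ii false ([] :: ch :: t) = [] :: proc ii true (ch :: t) from rfl]
      rcases hq : proc ii true (ch :: t) with _ | ⟨q, qs⟩
      · exact absurd hq (proc_ne_nil ii true (ch :: t) (by simp))
      · rw [PySem.Chars.join_cons_cons]
        simp
  | case2 c r hne ih =>
    intro ii
    obtain ⟨ch, t, hs⟩ : ∃ ch t, sp3 r = ch :: t := by
      rcases h : sp3 r with _ | ⟨ch, t⟩
      · exact absurd h (sp3_ne_nil r)
      · exact ⟨ch, t, rfl⟩
    rw [hs, List.modifyHead_cons]
    constructor
    · by_cases hc : c = '`'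
      · subst hc
        rw [goA_escape.eq_3 false ii '`' r hne, if_pos (by simp)]
        rw [(ih (!ii)).1, hs]
        rw [show proc ii true (('`' :: ch) :: t)
              = escOut ii ('`' :: ch) :: proc (ii ^^ pbt ('`' :: ch)) false t from rfl]
        rw [escOut_tick, pbt_tick, xorNotRight]
        rw [show proc (!ii) true (ch :: t)
              = escOut (!ii) ch :: proc ((!ii) ^^ pbt ch) false t from rfl]
        rw [show ('`' :: escOut (!ii) ch : List Char)
              = ['`'] ++ escOut (!ii) ch from rfl, join_head_append]
        rfl
      · rw [goA_escape.eq_3 false ii c r hne, if_neg (by simp [hc])]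
        rw [(ih ii).1, hs]
        rw [show proc ii true ((c :: ch) :: t)
              = escOut ii (c :: ch) :: proc (ii ^^ pbt (c :: ch)) false t from rfl]
        rw [escOut_char ii c ch hc, pbt_char c ch hc, join_head_append]
        rw [show proc ii true (ch :: t)
              = escOut ii ch :: proc (ii ^^ pbt ch) false t from rfl]
        cases ii with
        | true => simp
        | false =>
          by_cases h1 : c = '{' <;> by_cases h2 : c = '}' <;>
            simp_all [escCharL]
    · rw [goA_escape.eq_3 true ii c r hne]
      rw [if_neg (by simp), if_neg (by simp)]
      rw [(ih ii).2, hs]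
      rw [show proc ii false ((c :: ch) :: t) = (c :: ch) :: proc ii true t from rfl]
      rw [show proc ii false (ch :: t) = ch :: proc ii true t from rfl]
      rw [show (c :: ch : List Char) = [c] ++ ch from rfl, join_head_append]
      rfl
  | case3 =>
    intro ii
    constructor
    · rw [show goA_escape false ii [] = [] from rfl]
      rw [show proc ii true [[]] = [escOut ii []] from rfl, escOut_nil,
        PySem.Chars.join_singleton]
    · rw [show goA_escape true ii [] = [] from rfl]
      rw [show proc ii false [[]] = [[]] from rfl, PySem.Chars.join_singleton]

-- ===== VERDICT (by name: the statement is the Claim_ definition above) =====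
theorem escape_braces_outside_code_py_spec : Claim_equal_escape_braces_outside_code_py := by
  intro text _
  unfold Spec_escape_braces_outside_code_py escape_braces_outside_code_py
    escape_braces_outside_code_py_alt
  rw [splitOn_eq_sp3, fold_out, List.nil_append]
  by_cases he : text.toList = []
  · rw [if_pos he, he]
    have : text = String.ofList [] := by rw [← he, String.ofList_toList]
    rw [this]
    rfl
  · rw [if_neg he, (mainA text.toList false).1]
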